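-- pv_equiv track=rewrite | github.com/abubakar-ucr/LEONA | preprocessing/extract_all_utterances.py | get_starting_index_sgd
-- ===== SOURCE A (Python) =====
-- def get_starting_index_sgd(utterance, slot, index):
--     if index == 0:
--         return 0
--     req_index = 0
--     for my_index, word in enumerate(utterance.split()):
--         req_index += len(list(word) )+1
--         if req_index >=index:
--             return my_index+1 if my_index+1 < len(utterance.split()) else len(utterance.split())-1
-- ===== SOURCE B (Python) =====
-- def get_starting_index_sgd(utterance, slot, index):
--     if index == 0:
--         return 0
--     words = utterance.split()
--     # prefix table: cum[i] = sum of len(w)+1 over words[0..i]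
--     cum = []
--     total = 0
--     for w in words:
--         total += len(w) + 1
--         cum.append(total)
--     # binary search: first i with cum[i] >= index
--     lo, hi = 0, len(cum)
--     while lo < hi:
--         mid = (lo + hi) // 2
--         if cum[mid] < index:
--             lo = mid + 1
--         else:
--             hi = mid
--     if lo == len(words):
--         return None
--     return lo + 1 if lo + 1 < len(words) else len(words) - 1
-- ===== Notes on version B (the rewrite author's own statement) =====
-- stated objective: alternative
-- what changed: Replaces A's accumulating forward scan (which re-splits the utterance on every hit) with a one-pass prefix-sum table over the split words followed by a hand-written binary search for the first cumulative length reaching the index.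
import Mathlib
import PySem

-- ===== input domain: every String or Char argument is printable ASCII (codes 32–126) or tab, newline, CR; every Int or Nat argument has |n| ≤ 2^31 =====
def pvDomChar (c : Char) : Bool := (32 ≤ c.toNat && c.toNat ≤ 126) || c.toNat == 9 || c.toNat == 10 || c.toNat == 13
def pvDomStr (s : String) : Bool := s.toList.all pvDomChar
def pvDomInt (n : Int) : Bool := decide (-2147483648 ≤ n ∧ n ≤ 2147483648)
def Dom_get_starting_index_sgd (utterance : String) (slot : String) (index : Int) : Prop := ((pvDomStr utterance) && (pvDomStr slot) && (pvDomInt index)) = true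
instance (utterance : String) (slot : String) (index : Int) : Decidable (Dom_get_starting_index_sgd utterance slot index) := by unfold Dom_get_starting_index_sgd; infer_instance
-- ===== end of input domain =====

-- B replaces A's accumulating forward scan (which re-splits the utterance at every hit test)
-- by a prefix-sum table over the words plus a binary search; objective: alternative decomposition.

-- ===== PORT A =====
-- the 'for my_index, word in enumerate(utterance.split())' loop; req is req_index
def pvALoop (n : Int) (index : Int) : List (Int × String) → Int → Option Int
  | [], _ => none
  | (my_index, word) :: rest, req =>
    let req' := req + (PySem.Str.len word + 1)
    if index ≤ req' then
      some (if my_index + 1 < n then my_index + 1 else n - 1)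
    else pvALoop n index rest req'

def get_starting_index_sgd (utterance : String) (_slot : String) (index : Int) : Option Int :=
  if index = 0 then some 0
  else
    pvALoop ((PySem.Str.split₀ utterance).length : Int) index
      (PySem.List.enumerate (PySem.Str.split₀ utterance) 0) 0

-- ===== PORT B =====
-- 'for w in words: total += len(w)+1; cum.append(total)'
def pvCum : List String → Int → List Int
  | [], _ => []
  | w :: ws, total =>
    let total' := total + (PySem.Str.len w + 1)
    total' :: pvCum ws total'

-- the hand-written 'while lo < hi' binary search of Source B; cum[mid] is always in range,
-- so the in-range access is ported as getD (exact on every reached index)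
def pvBisect (cum : List Int) (x : Int) (lo hi : Nat) : Nat :=
  if _h : lo < hi then
    let mid := (lo + hi) / 2
    if cum.getD mid 0 < x then pvBisect cum x (mid + 1) hi
    else pvBisect cum x lo mid
  else lo
termination_by hi - lo
decreasing_by all_goals omega

def get_starting_index_sgd_alt (utterance : String) (_slot : String) (index : Int) : Option Int :=
  if index = 0 then some 0
  else
    let words := PySem.Str.split₀ utterance
    let cum := pvCum words 0
    let lo := pvBisect cum index 0 cum.length
    if lo = words.length then none
    else some (if (lo : Int) + 1 < (words.length : Int) then (lo : Int) + 1
               else (words.length : Int) - 1)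

-- ===== PRECONDITION & SPEC =====
def Spec_get_starting_index_sgd (utterance : String) (slot : String) (index : Int) (out : Option Int) : Prop := out = get_starting_index_sgd_alt utterance slot index
instance (utterance : String) (slot : String) (index : Int) (out : Option Int) : Decidable (Spec_get_starting_index_sgd utterance slot index out) := by unfold Spec_get_starting_index_sgd; infer_instance

-- ===== CLAIM (what is proved, stated in full; the proofs are below) =====
def Claim_equal_get_starting_index_sgd : Prop := ∀ (utterance : String) (slot : String) (index : Int), Dom_get_starting_index_sgd utterance slot index → Spec_get_starting_index_sgd utterance slot index (get_starting_index_sgd utterance slot index)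

-- ===== LEMMAS AND PROOFS =====

theorem pvCum_lb (ws : List String) (t : Int) : ∀ c ∈ pvCum ws t, t + 1 ≤ c := by
  induction ws generalizing t with
  | nil => simp [pvCum]
  | cons w ws ih =>
    intro c hc
    simp only [pvCum, List.mem_cons] at hc
    have hlen : (0:Int) ≤ PySem.Str.len w := by simp [PySem.Str.len_eq]
    rcases hc with rfl | hc
    · omega
    · have := ih (t + (PySem.Str.len w + 1)) c hc; omega

theorem pvCum_length (ws : List String) (t : Int) : (pvCum ws t).length = ws.length := by
  induction ws generalizing t with
  | nil => rfl
  | cons w ws ih => simp [pvCum, ih]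

theorem pvCum_mono (ws : List String) (t : Int) :
    ∀ i j : Nat, i ≤ j → j < (pvCum ws t).length →
      (pvCum ws t).getD i 0 ≤ (pvCum ws t).getD j 0 := by
  induction ws generalizing t with
  | nil => simp [pvCum]
  | cons w ws ih =>
    intro i j hij hj
    simp only [pvCum, List.length_cons] at hj ⊢
    cases i with
    | zero =>
      cases j with
      | zero => simp
      | succ j' =>
        simp only [List.getD_cons_zero, List.getD_cons_succ]
        have hj' : j' < (pvCum ws (t + (PySem.Str.len w + 1))).length := by omega
        have hmem : (pvCum ws (t + (PySem.Str.len w + 1))).getD j' 0 ∈ pvCum ws (t + (PySem.Str.len w + 1)) := by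
          rw [List.getD_eq_getElem _ _ hj']; exact List.getElem_mem hj'
        have := pvCum_lb ws (t + (PySem.Str.len w + 1)) _ hmem
        omega
    | succ i' =>
      cases j with
      | zero => omega
      | succ j' =>
        simp only [List.getD_cons_succ]
        exact ih _ i' j' (by omega) (by omega)

theorem pvBisect_char (cum : List Int) (x : Int) (lo hi : Nat)
    (hmono : ∀ i j : Nat, i ≤ j → j < cum.length → cum.getD i 0 ≤ cum.getD j 0)
    (hle : lo ≤ hi) (hhi : hi ≤ cum.length)
    (hlow : ∀ j : Nat, j < lo → cum.getD j 0 < x)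
    (hhigh : ∀ j : Nat, hi ≤ j → j < cum.length → x ≤ cum.getD j 0) :
    (∀ j : Nat, j < pvBisect cum x lo hi → cum.getD j 0 < x) ∧
    (pvBisect cum x lo hi < cum.length → x ≤ cum.getD (pvBisect cum x lo hi) 0) ∧
    pvBisect cum x lo hi ≤ cum.length := by
  rw [pvBisect]
  by_cases h : lo < hi
  · rw [dif_pos h]; show _ ∧ _ ∧ _
    by_cases hc : cum.getD ((lo + hi) / 2) 0 < x
    · rw [if_pos hc]
      exact pvBisect_char cum x ((lo + hi) / 2 + 1) hi hmono (by omega) hhi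
        (fun j hj => lt_of_le_of_lt (hmono j ((lo + hi) / 2) (by omega) (by omega)) hc)
        hhigh
    · rw [if_neg hc]
      exact pvBisect_char cum x lo ((lo + hi) / 2) hmono (by omega) (by omega) hlow
        (fun j hj1 hj2 => le_trans (not_lt.mp hc) (hmono ((lo + hi) / 2) j hj1 hj2))
  · rw [dif_neg h]
    exact ⟨hlow, fun hlt => hhigh lo (by omega) hlt, by omega⟩
termination_by hi - lo
decreasing_by all_goals omega

theorem pvALoop_char (index : Int) (n : Int) (ws : List String) (s t : Int) (r : Nat)
    (hr1 : ∀ j : Nat, j < r → (pvCum ws t).getD j 0 < index)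
    (hr2 : r < ws.length → index ≤ (pvCum ws t).getD r 0)
    (hr3 : r ≤ ws.length) :
    pvALoop n index (PySem.List.enumerate ws s) t =
      if r = ws.length then none
      else some (if s + (r : Int) + 1 < n then s + (r : Int) + 1 else n - 1) := by
  induction ws generalizing s t r with
  | nil =>
    simp only [List.length_nil, Nat.le_zero] at hr3
    subst hr3
    simp [PySem.List.enumerate_nil, pvALoop]
  | cons w ws ih =>
    rw [PySem.List.enumerate_cons]
    simp only [pvALoop]
    by_cases hc : index ≤ t + (PySem.Str.len w + 1)
    · rw [if_pos hc]
      have hr0 : r = 0 := by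
        by_contra hne
        have h0 := hr1 0 (by omega)
        simp only [pvCum, List.getD_cons_zero] at h0
        omega
      subst hr0
      have hne : ¬ ((0 : Nat) = (w :: ws).length) := by simp
      rw [if_neg hne]
      norm_num
    · rw [if_neg hc]
      cases r with
      | zero =>
        exfalso
        have h0 := hr2 (by simp)
        simp only [pvCum, List.getD_cons_zero] at h0
        omega
      | succ r' =>
        have h1 : ∀ j : Nat, j < r' → (pvCum ws (t + (PySem.Str.len w + 1))).getD j 0 < index := by
          intro j hj
          have := hr1 (j + 1) (by omega)
          simpa only [pvCum, List.getD_cons_succ] using this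
        have h2 : r' < ws.length → index ≤ (pvCum ws (t + (PySem.Str.len w + 1))).getD r' 0 := by
          intro hlt
          have := hr2 (by simp only [List.length_cons]; omega)
          simpa only [pvCum, List.getD_cons_succ] using this
        have h3 : r' ≤ ws.length := by
          simp only [List.length_cons] at hr3; omega
        rw [ih (s + 1) (t + (PySem.Str.len w + 1)) r' h1 h2 h3]
        by_cases he : r' = ws.length
        · rw [if_pos he, if_pos (by simp [he])]
        · have hne2 : ¬ (r' + 1 = (w :: ws).length) := by
            simp only [List.length_cons]; omega
          rw [if_neg he, if_neg hne2]
          have : s + 1 + (r' : Int) + 1 = s + ((r' : Nat) + 1 : Nat) + 1 := by push_cast; ring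
          rw [this]

-- ===== VERDICT (by name: the statement is the Claim_ definition above) =====
theorem get_starting_index_sgd_spec : Claim_equal_get_starting_index_sgd := by
  intro u slot index _hdom
  unfold Spec_get_starting_index_sgd get_starting_index_sgd get_starting_index_sgd_alt
  by_cases h0 : index = 0
  · simp [h0]
  · rw [if_neg h0, if_neg h0]
    set ws := PySem.Str.split₀ u with hws
    set cum := pvCum ws 0 with hcum
    have hlen : cum.length = ws.length := pvCum_length ws 0
    obtain ⟨hb1, hb2, hb3⟩ := pvBisect_char cum index 0 cum.length
      (pvCum_mono ws 0) (Nat.zero_le _) le_rfl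
      (fun j hj => absurd hj (Nat.not_lt_zero j))
      (fun j hj1 hj2 => absurd (lt_of_le_of_lt hj1 hj2) (lt_irrefl _))
    rw [pvALoop_char index (↑ws.length) ws 0 0 (pvBisect cum index 0 cum.length)
      hb1 (fun h => hb2 (lt_of_lt_of_le h hlen.ge)) (le_trans hb3 hlen.le)]
    by_cases he : pvBisect cum index 0 cum.length = ws.length
    · rw [if_pos he, if_pos he]
    · rw [if_neg he, if_neg he]
      simp only [hcum]
      norm_num
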